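/- GENERATED by tools/from_farm_form.py from prooffarm-gif/accepted/DGifOpen.5/Proof.lean (a worked proof of the farm's unit `DGifOpen.5`,
   accepted by the verdict) — do not edit. -/
import Gif.Spec.Units.DGifOpen_5
import Gif.Spec.AllSegs
import Gif.Spec.Proved.DGifOpen_5_Lemmas

open X86 X86.User Asan ProgX.Base ProgX.Base.Spec Gif.Spec

/-!
  `DGifOpen.5` (0x1087da … 0x108816 and the error exit 0x1088cb … 0x1088fa, 24 instructions; dgif_lib.c:227-239): a body segment of
  the protected function `DGifOpen` with three calls. The return addresses of the calls are not cuts of the design, so the unit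
  makes them cuts of its own (private assertions `seg5_AtRet15`, `seg5_AtRet27`, `seg5_AtRet28` in Lemmas.lean), one walk each:

      seg5_call   0x1087da … `DGifGetScreenDesc(gif)` … 0x1087e2 (ret15)
      seg5_ok     0x1087e2 … 0x108816, GIF_OK: the checked stores `gif.Error = 0`, `pv.gif89`
      seg5_err1   0x1087e2 … `free(pv)` … 0x1088d3 (ret27), GIF_ERROR
      seg5_err2   0x1088d3 … `free(gif)` … 0x1088db (ret28)
      seg5_err3   0x1088db … 0x108816: `*Error = 104` if `Error != NULL`, `ebx = 0`
-/

/-- Segment 5 of `DGifOpen` takes `Opened` at 0x1087da to `Done` (for some heap) at 0x108816. -/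
theorem Gif.Spec.Proved.DGifOpen_5_ok : Gif.Spec.DGifOpen_5.Statement := by
  intro Lay hLay μ hμ u₀ hcode h_desc h_free h_store4 h_store1 H rest frames R Hc gif pv e ret v hat
  -- the callee's contract for the frame list of the body (the own frame in front), the present heap and the forest of gif and pv
  have hdesc := h_desc Hc rest (DGifOpen.framesIn frames e) (DGifOpen.fresh gif pv) R
  -- 0x1087da … the call of DGifGetScreenDesc … 0x1087e2 (ret15)
  refine (Gif.Spec.DGifOpen_5.seg5_call Lay hLay μ hμ u₀ hcode H rest frames R Hc gif pv e ret hdesc v hat).trans ?_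
  intro v1 hv1
  obtain ⟨Hn, Fn, hret15⟩ := hv1
  -- `eax` is GIF_OK (1) or GIF_ERROR (0)
  rcases hret15.bool with hone | hzero
  · -- GIF_OK: 0x1087e2 … 0x108816
    exact Gif.Spec.DGifOpen_5.seg5_ok Lay hLay μ hμ u₀ hcode H rest frames R Hn Fn gif pv e ret h_store4 h_store1 v1 hret15 hone
  · -- GIF_ERROR: 0x1087e2 … `free(pv)` … 0x1088d3 (ret27), at the heap `Hn`
    have hfree1 := h_free Hn rest (DGifOpen.framesIn frames e) 24936
    refine (Gif.Spec.DGifOpen_5.seg5_err1 Lay hLay μ hμ u₀ hcode H rest frames R Hn Fn gif pv e ret hfree1 v1 hret15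
      hzero).trans ?_
    intro v2 hv2
    obtain ⟨Hm, hret27⟩ := hv2
    -- 0x1088d3 … `free(gif)` … 0x1088db (ret28), at the heap `Hm = Hn.release pv`
    have hfree2 := h_free Hm rest (DGifOpen.framesIn frames e) 120
    refine (Gif.Spec.DGifOpen_5.seg5_err2 Lay hLay μ hμ u₀ hcode H rest frames R Hm gif e ret hfree2 v2 hret27).trans ?_
    intro v3 hv3
    obtain ⟨Hk, hret28⟩ := hv3
    -- 0x1088db … 0x108816
    exact Gif.Spec.DGifOpen_5.seg5_err3 Lay hLay μ hμ u₀ hcode H rest frames R Hk e ret h_store4 v3 hret28
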